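-- pv_equiv track=rewrite | github.com/Youssefelsayed148/obe-architect-chatbot-version2 | app/services/rag_public.py | _safe_follow_up_from_sources
-- ===== SOURCE A (Python) =====
-- def _safe_follow_up_from_sources(sources: list[dict[str, str | None]]) -> str | None:
--     if any(str(src.get("size") or "").strip() for src in sources):
--         return "Which project has the largest built-up area in these sources?"
--
--     if any(str(src.get("status") or "").strip() for src in sources):
--         return "Which projects in these sources are marked as completed?"
--
--     locations = [str(src.get("location") or "").strip() for src in sources if str(src.get("location") or "").strip()]
--     if locations:
--         return f"Which projects in these sources are located in {locations[0]}?"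
--
--     return None
-- ===== SOURCE B (Python) =====
-- def _safe_follow_up_from_sources(sources: list[dict[str, str | None]]) -> str | None:
--     # Single pass: accumulate the three facts, then apply the priority order.
--     has_size = False
--     has_status = False
--     first_location = None
--     for src in sources:
--         if str(src.get("size") or "").strip():
--             has_size = True
--         if str(src.get("status") or "").strip():
--             has_status = True
--         if first_location is None:
--             loc = str(src.get("location") or "").strip()
--             if loc:
--                 first_location = loc
--     if has_size:
--         return "Which project has the largest built-up area in these sources?"
--     if has_status:
--         return "Which projects in these sources are marked as completed?"
--     if first_location is not None:
--         return f"Which projects in these sources are located in {first_location}?"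
--     return None
-- ===== Notes on version B (the rewrite author's own statement) =====
-- stated objective: alternative
-- what changed: Replaces A's three separate scans over sources (two any() passes and a list comprehension) with one loop maintaining two boolean flags and the first non-empty location, applying the priority order after the loop.
import Mathlib
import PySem

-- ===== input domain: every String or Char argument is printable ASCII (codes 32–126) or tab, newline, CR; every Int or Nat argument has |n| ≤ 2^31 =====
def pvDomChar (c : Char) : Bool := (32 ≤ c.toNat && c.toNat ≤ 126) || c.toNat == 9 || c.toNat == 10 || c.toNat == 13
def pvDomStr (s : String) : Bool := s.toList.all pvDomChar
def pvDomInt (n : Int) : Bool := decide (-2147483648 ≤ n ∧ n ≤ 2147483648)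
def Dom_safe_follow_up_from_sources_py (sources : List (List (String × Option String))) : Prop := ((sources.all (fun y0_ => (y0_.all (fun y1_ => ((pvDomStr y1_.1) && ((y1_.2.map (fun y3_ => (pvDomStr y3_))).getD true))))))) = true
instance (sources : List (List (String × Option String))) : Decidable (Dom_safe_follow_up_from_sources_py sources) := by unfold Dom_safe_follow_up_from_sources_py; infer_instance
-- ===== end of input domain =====

-- ===== PORT A =====
-- Re-implementation note: B does one pass with accumulators instead of A's three scans (objective: alternative).
-- helper shared verbatim by both Pythons: str(src.get(k) or "").strip()
def pvField (src : List (String × Option String)) (k : String) : String :=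
  PySem.Str.strip (match (PySem.Dict.mk src).get? k with | some (some s) => s | _ => "")

def safe_follow_up_from_sources_py (sources : List (List (String × Option String))) : Option String :=
  if sources.any (fun src => pvField src "size" != "") then
    some "Which project has the largest built-up area in these sources?"
  else if sources.any (fun src => pvField src "status" != "") then
    some "Which projects in these sources are marked as completed?"
  else
    let locations := (sources.filter (fun src => pvField src "location" != "")).map
      (fun src => pvField src "location")
    match locations with
    | l :: _ => some ("Which projects in these sources are located in " ++ l ++ "?")
    | [] => none

-- ===== PORT B =====
def safe_follow_up_from_sources_py_alt (sources : List (List (String × Option String))) : Option String :=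
  let st := sources.foldl (fun (acc : Bool × Bool × Option String) src =>
      let hs := if pvField src "size" != "" then true else acc.1
      let ht := if pvField src "status" != "" then true else acc.2.1
      let fl := match acc.2.2 with
                | some l => some l
                | none =>
                  let loc := pvField src "location"
                  if loc != "" then some loc else none
      (hs, ht, fl)) (false, false, none)
  if st.1 then some "Which project has the largest built-up area in these sources?"
  else if st.2.1 then some "Which projects in these sources are marked as completed?"
  else
    match st.2.2 with
    | some l => some ("Which projects in these sources are located in " ++ l ++ "?")
    | none => none

-- ===== PRECONDITION & SPEC =====
def Spec_safe_follow_up_from_sources_py (sources : List (List (String × Option String))) (out : Option String) : Prop := out = safe_follow_up_from_sources_py_alt sources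
instance (sources : List (List (String × Option String))) (out : Option String) : Decidable (Spec_safe_follow_up_from_sources_py sources out) := by unfold Spec_safe_follow_up_from_sources_py; infer_instance

-- ===== CLAIM =====
def Claim_equal_safe_follow_up_from_sources_py : Prop := ∀ (sources : List (List (String × Option String))), Dom_safe_follow_up_from_sources_py sources → Spec_safe_follow_up_from_sources_py sources (safe_follow_up_from_sources_py sources)

-- ===== LEMMAS AND PROOFS =====
-- The fold of B computes exactly: (any size, any status, first non-empty location).
theorem pvFold_char (sources : List (List (String × Option String))) (s t : Bool)
    (l : Option String) :
    sources.foldl (fun (acc : Bool × Bool × Option String) src =>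
      let hs := if pvField src "size" != "" then true else acc.1
      let ht := if pvField src "status" != "" then true else acc.2.1
      let fl := match acc.2.2 with
                | some l => some l
                | none =>
                  let loc := pvField src "location"
                  if loc != "" then some loc else none
      (hs, ht, fl)) (s, t, l)
    = (s || sources.any (fun src => pvField src "size" != ""),
       t || sources.any (fun src => pvField src "status" != ""),
       (Option.or l (((sources.filter (fun src => pvField src "location" != "")).map
          (fun src => pvField src "location")).head?))) := by
  induction sources generalizing s t l with
  | nil => simp
  | cons hd tl ih =>
    simp only [List.foldl_cons, List.any_cons, List.filter_cons, ih]
    by_cases h1 : (pvField hd "size" != "") = true <;>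
      by_cases h2 : (pvField hd "status" != "") = true <;>
        by_cases h3 : (pvField hd "location" != "") = true <;>
          cases l <;> simp [h1, h2, h3]

-- ===== VERDICT =====
theorem safe_follow_up_from_sources_py_spec : Claim_equal_safe_follow_up_from_sources_py := by
  intro sources _
  unfold Spec_safe_follow_up_from_sources_py safe_follow_up_from_sources_py
    safe_follow_up_from_sources_py_alt
  rw [pvFold_char]
  simp only [Bool.false_or, Option.none_or]
  split_ifs with hs ht
  · rfl
  · rfl
  · cases (sources.filter (fun src => pvField src "location" != "")).map
      (fun src => pvField src "location") <;> rfl
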